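-- pv_equiv track=rewrite | github.com/Sandin89/recipe-search | app/services/search_service.py | search_recipes
-- ===== SOURCE A (Python) =====
-- from typing import List, Dict, Optional
--
-- def _normalize(text: str) -> str:
--     return (text or "").lower().strip()
--
-- def _recipe_text(recipe: Dict) -> str:
--     name = recipe.get("name", "")
--     ingredients = recipe.get("ingredients", "")
--     return f"{name} {ingredients}".lower()
--
-- def _matches_query(recipe: Dict, query: Optional[str]) -> bool:
--     q = _normalize(query)
--     if not q:
--         return True
--     return q in _recipe_text(recipe)
--
-- def _contains_excluded(recipe: Dict, exclude: List[str]) -> bool: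
--     text = _recipe_text(recipe)
--     return any(_normalize(word) and _normalize(word) in text for word in exclude)
--
-- def _include_score(recipe: Dict, include: List[str]) -> int:
--     text = _recipe_text(recipe)
--     score = 0
--     for word in include:
--         w = _normalize(word)
--         if w and w in text:
--             score += 1
--     return score
--
-- def _contains_all_includes(recipe: Dict, include: List[str]) -> bool:
--     text = _recipe_text(recipe)
--     for word in include:
--         w = _normalize(word)
--         if w and w not in text:
--             return False
--     return True
--
-- def search_recipes(
--     recipes: List[Dict],
--     query: Optional[str],
--     include: List[str],
--     exclude: List[str],
--     limit: int,
--     offset: int,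
--     require_all_includes: bool = False,
-- ) -> List[Dict]:
--     results = []
--
--     for recipe in recipes:
--         if not _matches_query(recipe, query):
--             continue
--         if exclude and _contains_excluded(recipe, exclude):
--             continue
--
--         # här vill  jag vara extra strikt (t.ex. AI->översatt ingrediens),
--         # kräver jag att alla include-termer faktiskt finns i texten.
--         if include and require_all_includes and not _contains_all_includes(recipe, include):
--             continue
--
--         score = _include_score(recipe, include) if include else 0
--         results.append((score, recipe))
--
--     results.sort(key=lambda x: x[0], reverse=True)
--
--     offset = max(0, offset)
--     limit = max(1, min(100, limit))  # skydd: 1..100, borde räcka för denna uppgift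
--
--     sliced = results[offset: offset + limit]
--     return [recipe for _, recipe in sliced]
-- ===== SOURCE B (Python) =====
-- from typing import List, Dict, Optional
--
-- def search_recipes(
--     recipes: List[Dict],
--     query: Optional[str],
--     include: List[str],
--     exclude: List[str],
--     limit: int,
--     offset: int,
--     require_all_includes: bool = False,
-- ) -> List[Dict]:
--     # normalize the search terms once, up front (A re-normalizes per recipe)
--     q = (query or "").lower().strip()
--     inc = [w for w in ((t or "").lower().strip() for t in include) if w]
--     exc = [w for w in ((t or "").lower().strip() for t in exclude) if w]
--
--     n = len(include)
--     # bucket sort: scores are ints in 0..n, so no comparison sort is needed;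
--     # appending in scan order keeps Python's stable tie order
--     buckets = [[] for _ in range(n + 1)]
--     for recipe in recipes:
--         text = f"{recipe.get('name', '')} {recipe.get('ingredients', '')}".lower()
--         if q and q not in text:
--             continue
--         if any(w in text for w in exc):
--             continue
--         if include and require_all_includes and not all(w in text for w in inc):
--             continue
--         score = sum(1 for w in inc if w in text) if include else 0
--         buckets[score].append(recipe)
--
--     ordered = []
--     for s in range(n, -1, -1):
--         ordered.extend(buckets[s])
--
--     offset = max(0, offset)
--     limit = max(1, min(100, limit))
--     return ordered[offset: offset + limit]
-- ===== Notes on version B (the rewrite author's own statement) =====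
-- stated objective: alternative
-- what changed: B normalizes the query/include/exclude terms once up front and replaces A's comparison sort of (score, recipe) pairs by a bucket/counting sort over the integer score range 0..len(include), concatenating the buckets in descending score order (scan order inside a bucket preserves Python's stable tie order).
import Mathlib
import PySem

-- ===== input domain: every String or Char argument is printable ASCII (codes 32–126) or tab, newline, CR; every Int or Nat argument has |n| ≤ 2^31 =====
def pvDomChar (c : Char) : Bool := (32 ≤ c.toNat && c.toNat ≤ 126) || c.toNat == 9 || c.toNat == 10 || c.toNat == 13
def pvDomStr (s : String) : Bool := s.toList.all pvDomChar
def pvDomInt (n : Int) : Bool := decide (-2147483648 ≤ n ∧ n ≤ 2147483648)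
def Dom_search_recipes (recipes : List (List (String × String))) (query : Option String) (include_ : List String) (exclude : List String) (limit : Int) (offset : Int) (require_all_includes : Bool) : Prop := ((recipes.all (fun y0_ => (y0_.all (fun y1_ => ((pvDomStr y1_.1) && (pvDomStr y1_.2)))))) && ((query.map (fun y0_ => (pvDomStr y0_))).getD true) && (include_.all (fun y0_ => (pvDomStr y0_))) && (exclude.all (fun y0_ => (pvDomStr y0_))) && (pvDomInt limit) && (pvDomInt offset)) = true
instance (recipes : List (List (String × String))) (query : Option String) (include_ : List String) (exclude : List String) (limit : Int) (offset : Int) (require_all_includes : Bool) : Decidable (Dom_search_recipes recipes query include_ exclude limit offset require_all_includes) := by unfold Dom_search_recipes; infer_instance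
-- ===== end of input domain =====

-- B replaces A's comparison sort of (score, recipe) pairs by a bucket/counting sort over the
-- score range 0..len(include), with the search terms normalized once up front (objective: alternative).

-- ===== PORT A =====
-- _normalize(text): (text or "").lower().strip() — on a non-None str, 'text or ""' is the identity
def pvNormalize (text : String) : String := PySem.Str.strip (PySem.Str.lower text)

-- _recipe_text(recipe): f"{name} {ingredients}".lower()
def pvRecipeText (recipe : List (String × String)) : String :=
  PySem.Str.lower ((PySem.Dict.mk recipe).getD "name" "" ++ " " ++ (PySem.Dict.mk recipe).getD "ingredients" "")

-- _matches_query (query=None passes "" into _normalize via 'text or ""')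
def pvMatchesQuery (recipe : List (String × String)) (query : Option String) : Bool :=
  let q := pvNormalize (query.getD "")
  if q = "" then true else PySem.Str.isIn q (pvRecipeText recipe)

-- _contains_excluded: any(_normalize(w) and _normalize(w) in text for w in exclude)
def pvContainsExcluded (recipe : List (String × String)) (exclude : List String) : Bool :=
  let text := pvRecipeText recipe
  exclude.any (fun word => pvNormalize word ≠ "" && PySem.Str.isIn (pvNormalize word) text)

-- _include_score: the counting loop
def pvIncludeScore (recipe : List (String × String)) (include_ : List String) : Int :=
  let text := pvRecipeText recipe
  include_.foldl (fun score word =>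
    if pvNormalize word ≠ "" && PySem.Str.isIn (pvNormalize word) text then score + 1 else score) 0

-- _contains_all_includes: 'if w and w not in text: return False' loop = all of the negation
def pvContainsAllIncludes (recipe : List (String × String)) (include_ : List String) : Bool :=
  let text := pvRecipeText recipe
  include_.all (fun word => !(pvNormalize word ≠ "" && !PySem.Str.isIn (pvNormalize word) text))

def search_recipes (recipes : List (List (String × String))) (query : Option String) (include_ : List String) (exclude : List String) (limit : Int) (offset : Int) (require_all_includes : Bool) : List (List (String × String)) :=
  let results : List (Int × List (String × String)) := recipes.foldl (fun acc recipe =>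
    if !pvMatchesQuery recipe query then acc
    else if !exclude.isEmpty && pvContainsExcluded recipe exclude then acc
    else if !include_.isEmpty && require_all_includes && !pvContainsAllIncludes recipe include_ then acc
    else acc ++ [((if !include_.isEmpty then pvIncludeScore recipe include_ else 0), recipe)]) []
  let sortedResults := PySem.List.sorted results (fun x => x.1) true
  let offset' := max 0 offset
  let limit' := max 1 (min 100 limit)
  (PySem.List.slice sortedResults (some offset') (some (offset' + limit'))).map (fun p => p.2)

-- ===== PORT B =====
def search_recipes_alt (recipes : List (List (String × String))) (query : Option String) (include_ : List String) (exclude : List String) (limit : Int) (offset : Int) (require_all_includes : Bool) : List (List (String × String)) :=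
  let q := pvNormalize (query.getD "")
  let inc := (include_.map pvNormalize).filter (fun w => w ≠ "")
  let exc := (exclude.map pvNormalize).filter (fun w => w ≠ "")
  let n := include_.length
  let buckets := recipes.foldl (fun bs recipe =>
    let text := pvRecipeText recipe
    if q ≠ "" && !PySem.Str.isIn q text then bs
    else if exc.any (fun w => PySem.Str.isIn w text) then bs
    else if !include_.isEmpty && require_all_includes && !inc.all (fun w => PySem.Str.isIn w text) then bs
    else
      -- score = sum(1 for w in inc if w in text); 0 ≤ score ≤ n, so buckets[score] is in range
      let score : Int := if !include_.isEmpty then ((inc.filter (fun w => PySem.Str.isIn w text)).length : Int) else 0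
      bs.set score.toNat (bs.getD score.toNat [] ++ [recipe]))
    (List.replicate (n + 1) ([] : List (List (String × String))))
  let ordered := (PySem.List.pyRange (n : Int) (-1) (-1)).foldl (fun acc s => acc ++ buckets.getD s.toNat []) []
  let offset' := max 0 offset
  let limit' := max 1 (min 100 limit)
  PySem.List.slice ordered (some offset') (some (offset' + limit'))

-- ===== PRECONDITION & SPEC =====
def Spec_search_recipes (recipes : List (List (String × String))) (query : Option String) (include_ : List String) (exclude : List String) (limit : Int) (offset : Int) (require_all_includes : Bool) (out : List (List (String × String))) : Prop := out = search_recipes_alt recipes query include_ exclude limit offset require_all_includes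
instance (recipes : List (List (String × String))) (query : Option String) (include_ : List String) (exclude : List String) (limit : Int) (offset : Int) (require_all_includes : Bool) (out : List (List (String × String))) : Decidable (Spec_search_recipes recipes query include_ exclude limit offset require_all_includes out) := by unfold Spec_search_recipes; infer_instance

-- ===== CLAIM (what is proved, stated in full; the proofs are below) =====
def Claim_equal_search_recipes : Prop := ∀ (recipes : List (List (String × String))) (query : Option String) (include_ : List String) (exclude : List String) (limit : Int) (offset : Int) (require_all_includes : Bool), Dom_search_recipes recipes query include_ exclude limit offset require_all_includes → Spec_search_recipes recipes query include_ exclude limit offset require_all_includes (search_recipes recipes query include_ exclude limit offset require_all_includes)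

-- ===== LEMMAS AND PROOFS =====

-- the common keep-predicate and score, used only by the proofs
def pvKeep (query : Option String) (include_ : List String) (exclude : List String) (require_all_includes : Bool) (recipe : List (String × String)) : Bool :=
  pvMatchesQuery recipe query &&
  !(!exclude.isEmpty && pvContainsExcluded recipe exclude) &&
  !(!include_.isEmpty && require_all_includes && !pvContainsAllIncludes recipe include_)

def pvScore (include_ : List String) (recipe : List (String × String)) : Int :=
  if !include_.isEmpty then pvIncludeScore recipe include_ else 0

-- [n, n-1, …, 0] as integers
def pvDesc : Nat → List Int
  | 0 => [0]
  | n + 1 => ((n + 1 : Nat) : Int) :: pvDesc n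

theorem pvDesc_mem {n : Nat} {s : Int} (h : s ∈ pvDesc n) : 0 ≤ s ∧ s ≤ n := by
  induction n with
  | zero => simp [pvDesc] at h; omega
  | succ m ih =>
    simp only [pvDesc, List.mem_cons] at h
    rcases h with h | h
    · omega
    · have := ih h; omega

theorem pvDesc_length (n : Nat) : (pvDesc n).length = n + 1 := by
  induction n with
  | zero => rfl
  | succ m ih => simp [pvDesc, ih]

theorem pvDesc_getElem (n i : Nat) (h : i < n + 1) :
    (pvDesc n)[i]'(by rw [pvDesc_length]; omega) = (n : Int) - i := by
  induction n generalizing i with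
  | zero => interval_cases i; simp [pvDesc]
  | succ m ih =>
    cases i with
    | zero => simp [pvDesc]
    | succ j =>
      have hj : j < m + 1 := by omega
      simp only [pvDesc, List.getElem_cons_succ, ih j hj]
      push_cast; ring

theorem pvRange_closed (n : Nat) : PySem.List.pyRange (n : Int) (-1) (-1) = (List.range (n+1)).map (fun (k : Nat) => (n : Int) - (k : Int)) := by
  simp only [PySem.List.pyRange]
  rw [if_neg (by norm_num), if_neg (by norm_num), if_pos (by omega : (-1:Int) < n)]
  have : ((n : Int) - -1 + -(-1) - 1) / -(-1) = ((n+1 : Nat) : Int) := by norm_num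
  rw [this, Int.toNat_natCast]
  apply List.map_congr_left
  intro k _
  omega

theorem pvRange_eq_desc (n : Nat) : PySem.List.pyRange (n : Int) (-1) (-1) = pvDesc n := by
  rw [pvRange_closed]
  apply List.ext_getElem
  · simp [pvDesc_length]
  · intro i h1 h2
    rw [List.getElem_map, List.getElem_range,
      pvDesc_getElem n i (by rw [pvDesc_length] at h2; omega)]

theorem insertBy_cons {α : Type} (before : α → α → Bool) (x y : α) (ys : List α) :
    PySem.List.insertBy before x (y :: ys) =
      if before x y then x :: y :: ys else y :: PySem.List.insertBy before x ys := rfl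

theorem insertBy_append_not_before {α : Type} (before : α → α → Bool) (x : α) (ys zs : List α)
    (h : ∀ y ∈ ys, before x y = false) :
    PySem.List.insertBy before x (ys ++ zs) = ys ++ PySem.List.insertBy before x zs := by
  induction ys with
  | nil => simp
  | cons y ys ih =>
    simp only [List.cons_append, insertBy_cons, h y (by simp)]
    simp only [Bool.false_eq_true, if_false, List.cons.injEq, true_and]
    exact ih (fun y hy => h y (by simp [hy]))

theorem insertBy_all_before {α : Type} (before : α → α → Bool) (x : α) (zs : List α)
    (h : ∀ z ∈ zs, before x z = true) :
    PySem.List.insertBy before x zs = x :: zs := by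
  cases zs with
  | nil => rfl
  | cons z zs => simp [insertBy_cons, h z (by simp)]

-- stable descending insertion of an in-range key lands at the end of its bucket
theorem insert_desc {α : Type} (n : Nat) (x : Int × α) (Q : List (Int × α))
    (hx : 0 ≤ x.1 ∧ x.1 ≤ n) :
    PySem.List.insertBy (fun a b => decide (b.1 < a.1)) x
        ((pvDesc n).flatMap (fun s => Q.filter (fun p => p.1 == s))) =
      (pvDesc n).flatMap (fun s => (Q ++ [x]).filter (fun p => p.1 == s)) := by
  induction n with
  | zero =>
    simp only [pvDesc, List.flatMap_cons, List.flatMap_nil, List.append_nil]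
    have hx0 : x.1 = 0 := by omega
    rw [PySem.List.insertBy_of_forall_not_before _ _ _ (fun y hy => by
      simp only [List.mem_filter, beq_iff_eq] at hy
      simp [hy.2, hx0])]
    simp [List.filter_append, hx0]
  | succ m ih =>
    simp only [pvDesc, List.flatMap_cons]
    have hfa : ((Q ++ [x]).filter (fun p => p.1 == ((m+1:Nat):Int))) =
        Q.filter (fun p => p.1 == ((m+1:Nat):Int)) ++ (if x.1 = ((m+1:Nat):Int) then [x] else []) := by
      rw [List.filter_append, List.filter_singleton]
      push_cast
      simp
    by_cases hk : x.1 = ((m+1 : Nat) : Int)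
    · -- x joins the top bucket: pass through it, then sit at the head of the lower buckets
      have hlow : (pvDesc m).flatMap (fun s => (Q ++ [x]).filter (fun p => p.1 == s)) =
          (pvDesc m).flatMap (fun s => Q.filter (fun p => p.1 == s)) := by
        apply List.flatMap_congr
        intro s hs
        have := pvDesc_mem hs
        rw [List.filter_append]
        simp [show ¬ (x.1 == s) = true by simp; omega]
      rw [hlow, hfa, if_pos hk]
      rw [insertBy_append_not_before _ _ _ _ (fun y hy => by
        simp only [List.mem_filter, beq_iff_eq] at hy
        simp [hy.2, hk])]
      rw [insertBy_all_before _ _ _ (fun z hz => by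
        simp only [List.mem_flatMap, List.mem_filter, beq_iff_eq] at hz
        obtain ⟨s, hs, _, hzs⟩ := hz
        have := pvDesc_mem hs
        simp [hzs, hk]; omega)]
      simp
    · -- x belongs below the top bucket
      have hx' : 0 ≤ x.1 ∧ x.1 ≤ m := by push_cast at hx; omega
      rw [insertBy_append_not_before _ _ _ _ (fun y hy => by
        simp only [List.mem_filter, beq_iff_eq] at hy
        simp [hy.2]; omega)]
      rw [ih hx', hfa, if_neg hk]
      simp

-- Python's stable reverse sort of pairs keyed by an Int in [0, n] = descending bucket concatenation
theorem sorted_rev_eq_desc_flatMap {α : Type} (n : Nat) (L : List (Int × α))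
    (h : ∀ p ∈ L, 0 ≤ p.1 ∧ p.1 ≤ n) :
    PySem.List.sorted L (fun x => x.1) true =
      (pvDesc n).flatMap (fun s => L.filter (fun p => p.1 == s)) := by
  rw [PySem.List.sorted_rev_eq_foldl_insertBy]
  induction L using List.reverseRecOn with
  | nil => simp
  | append_singleton Q x ih =>
    rw [List.foldl_append, List.foldl_cons, List.foldl_nil,
      ih (fun p hp => h p (by simp [hp])), insert_desc n x Q (h x (by simp))]

-- the bucket-filling loop computes per-score filters of the surviving scan order
theorem foldl_buckets {α : Type} (S : List α) (sc : α → Int) (n : Nat)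
    (h : ∀ r ∈ S, 0 ≤ sc r ∧ sc r ≤ n) :
    S.foldl (fun bs r => bs.set (sc r).toNat (bs.getD (sc r).toNat [] ++ [r]))
        (List.replicate (n+1) []) =
      (List.range (n+1)).map (fun (k : Nat) => S.filter (fun r => sc r == ((k : Nat) : Int))) := by
  induction S using List.reverseRecOn with
  | nil =>
    apply List.ext_getElem
    · simp
    · intro i h1 h2
      simp
  | append_singleton Q x ih =>
    rw [List.foldl_append, List.foldl_cons, List.foldl_nil,
      ih (fun r hr => h r (by simp [hr]))]
    have hx := h x (by simp)
    have hlt : (sc x).toNat < n + 1 := by omega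
    rw [PySem.List.getD_map_range _ _ _ _ hlt]
    apply List.ext_getElem
    · simp
    · intro i h1 h2
      simp only [List.getElem_set, List.getElem_map, List.getElem_range, List.filter_append,
        List.filter_singleton]
      by_cases hi : (sc x).toNat = i
      · rw [if_pos hi, hi]
        have hsx : (sc x == (i : Int)) = true := by simp; omega
        rw [hsx]
        simp
      · rw [if_neg hi]
        have hsx : (sc x == (i : Int)) = false := by simp; omega
        rw [hsx]
        simp
theorem slice_map {α β : Type} (f : α → β) (xs : List α) (a b : Option Int) :
    (PySem.List.slice xs a b).map f = PySem.List.slice (xs.map f) a b := by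
  simp [PySem.List.slice, List.map_take, List.map_drop]

theorem stepA_eq (query : Option String) (include_ exclude : List String) (req : Bool)
    (acc : List (Int × List (String × String))) (r : List (String × String)) :
    (if !pvMatchesQuery r query then acc
     else if !exclude.isEmpty && pvContainsExcluded r exclude then acc
     else if !include_.isEmpty && req && !pvContainsAllIncludes r include_ then acc
     else acc ++ [((if !include_.isEmpty then pvIncludeScore r include_ else 0), r)])
    = if pvKeep query include_ exclude req r then acc ++ [(pvScore include_ r, r)] else acc := by
  unfold pvKeep pvScore
  cases h1 : pvMatchesQuery r query <;>
    cases h2 : (!exclude.isEmpty && pvContainsExcluded r exclude) <;>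
      cases h3 : (!include_.isEmpty && req && !pvContainsAllIncludes r include_) <;>
        simp

theorem condB1_eq (query : Option String) (r : List (String × String)) :
    (pvNormalize (query.getD "") ≠ "" && !PySem.Str.isIn (pvNormalize (query.getD "")) (pvRecipeText r))
      = !pvMatchesQuery r query := by
  unfold pvMatchesQuery
  by_cases h : pvNormalize (query.getD "") = "" <;> simp [h]

theorem condB2_eq (exclude : List String) (r : List (String × String)) :
    ((exclude.map pvNormalize).filter (fun w => w ≠ "")).any (fun w => PySem.Str.isIn w (pvRecipeText r))
      = (!exclude.isEmpty && pvContainsExcluded r exclude) := by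
  unfold pvContainsExcluded
  cases exclude with
  | nil => simp
  | cons a l => simp [List.any_filter, List.any_map, Function.comp_def]

theorem condB3_eq (include_ : List String) (r : List (String × String)) :
    ((include_.map pvNormalize).filter (fun w => w ≠ "")).all (fun w => PySem.Str.isIn w (pvRecipeText r))
      = pvContainsAllIncludes r include_ := by
  unfold pvContainsAllIncludes
  simp [List.all_filter, List.all_map, Function.comp_def]

theorem scoreB_eq (include_ : List String) (r : List (String × String)) :
    (if !include_.isEmpty
     then (((((include_.map pvNormalize).filter (fun w => w ≠ "")).filter
         (fun w => PySem.Str.isIn w (pvRecipeText r))).length : Nat) : Int)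
     else 0) = pvScore include_ r := by
  unfold pvScore pvIncludeScore
  congr 1
  rw [PySem.List.foldl_if_add_one]
  rw [← List.countP_eq_length_filter, List.countP_filter, List.countP_map]
  rw [zero_add]
  exact congrArg Nat.cast
    (List.countP_congr (fun w _ => by simp [Bool.and_comm]))

theorem pvScore_bound (include_ : List String) (r : List (String × String)) :
    0 ≤ pvScore include_ r ∧ pvScore include_ r ≤ include_.length := by
  unfold pvScore pvIncludeScore
  split
  · rw [PySem.List.foldl_if_add_one]
    have := List.countP_le_length
      (p := fun word => pvNormalize word ≠ "" && PySem.Str.isIn (pvNormalize word) (pvRecipeText r))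
      (l := include_)
    constructor <;> [positivity; (push_cast; omega)]
  · constructor <;> [rfl; positivity]

theorem stepB_eq (query : Option String) (include_ exclude : List String) (req : Bool)
    (bs : List (List (List (String × String)))) (r : List (String × String)) :
    (if !pvMatchesQuery r query then bs
     else if (!exclude.isEmpty && pvContainsExcluded r exclude) then bs
     else if (!include_.isEmpty && req && !pvContainsAllIncludes r include_) then bs
     else bs.set (pvScore include_ r).toNat (bs.getD (pvScore include_ r).toNat [] ++ [r]))
    = if pvKeep query include_ exclude req r
      then bs.set (pvScore include_ r).toNat (bs.getD (pvScore include_ r).toNat [] ++ [r])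
      else bs := by
  unfold pvKeep
  cases h1 : pvMatchesQuery r query <;>
    cases h2 : (!exclude.isEmpty && pvContainsExcluded r exclude) <;>
      cases h3 : (!include_.isEmpty && req && !pvContainsAllIncludes r include_) <;>
        simp

-- ===== VERDICT (by name: the statement is the Claim_ definition above) =====
theorem search_recipes_spec : Claim_equal_search_recipes := by
  intro recipes query include_ exclude limit offset req _dom
  unfold Spec_search_recipes
  simp only [search_recipes, search_recipes_alt]
  rw [slice_map]
  congr 1
  -- A's results list = survivors paired with their scores
  rw [show (recipes.foldl (fun acc recipe =>
      if !pvMatchesQuery recipe query then acc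
      else if !exclude.isEmpty && pvContainsExcluded recipe exclude then acc
      else if !include_.isEmpty && req && !pvContainsAllIncludes recipe include_ then acc
      else acc ++ [((if !include_.isEmpty then pvIncludeScore recipe include_ else 0), recipe)]) [])
    = (recipes.filter (pvKeep query include_ exclude req)).map (fun r => (pvScore include_ r, r)) from by
      simp only [stepA_eq]
      rw [PySem.List.foldl_append_if]
      simp]
  -- B's bucket loop over the survivors
  simp only [condB1_eq, condB2_eq, condB3_eq, scoreB_eq, stepB_eq]
  rw [PySem.List.foldl_if_eq_foldl_filter (p := pvKeep query include_ exclude req)]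
  rw [foldl_buckets (recipes.filter (pvKeep query include_ exclude req)) (pvScore include_)
    include_.length (fun r _ => pvScore_bound include_ r)]
  rw [pvRange_eq_desc, PySem.List.foldl_append_eq_flatMap, List.nil_append]
  -- A's stable reverse sort = descending bucket concatenation
  rw [sorted_rev_eq_desc_flatMap include_.length _ (fun p hp => by
    simp only [List.mem_map] at hp
    obtain ⟨r, _, rfl⟩ := hp
    exact pvScore_bound include_ r)]
  rw [List.map_flatMap]
  apply List.flatMap_congr
  intro s hs
  have hs' := pvDesc_mem hs
  rw [PySem.List.getD_map_range _ _ _ _ (by omega : s.toNat < include_.length + 1)]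
  rw [List.filter_map]
  rw [show ((s.toNat : Nat) : Int) = s from by omega]
  simp [Function.comp_def, List.map_map]
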